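-- pv_equiv track=rewrite | github.com/sennetconsortium/rna-data-products | make_uuids_tsv.py | extract_donor_metadata
-- ===== SOURCE A (Python) =====
-- def extract_donor_metadata(metadata):
--     donor_info = {
--         "age": None,
--         "sex": None,
--         "height": None,
--         "weight": None,
--         "bmi": None,
--         "cause_of_death": None,
--         "race": None,
--         "social_history": None,
--         "abo_blood_type": None,
--         "mechanism_of_injury": None,
--     }
--
--     donor_metadata = metadata.get("mapped_metadata", {})
--
--     for key in donor_metadata:
--         if key == "abo_blood_group_system":
--             donor_info["abo_blood_type"] = donor_metadata[key].get("value_display")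
--         elif key == "age":
--             donor_info["age"] = donor_metadata[key].get("value_display")
--         elif key == "body_mass_index":
--             donor_info["bmi"] = donor_metadata[key].get("value_display")
--         elif key == "cause_of_death":
--             donor_info["cause_of_death"] = donor_metadata[key].get("value_display")
--         elif key == "height":
--             donor_info["height"] = donor_metadata[key].get("value_display")
--         elif key == "mechanism_of_injury":
--             donor_info["mechanism_of_injury"] = donor_metadata[key].get("value_display")
--         elif key == "race":
--             donor_info["race"] = donor_metadata[key].get("value_display")
--         elif key == "sex":
--             donor_info["sex"] = donor_metadata[key].get("value_display")
--         elif key == "social_history":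
--             donor_info["social_history"] = donor_metadata[key].get("value_display")
--         elif key == "weight":
--             donor_info["weight"] = donor_metadata[key].get("value_display")
--
--     return donor_info
-- ===== SOURCE B (Python) =====
-- # Table-driven rewrite: a fixed (output field, source key) map and a dict
-- # comprehension replace A's mutated dict + per-input-key if/elif dispatch.
-- _FIELD_MAP = (
--     ("age", "age"),
--     ("sex", "sex"),
--     ("height", "height"),
--     ("weight", "weight"),
--     ("bmi", "body_mass_index"),
--     ("cause_of_death", "cause_of_death"),
--     ("race", "race"),
--     ("social_history", "social_history"),
--     ("abo_blood_type", "abo_blood_group_system"),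
--     ("mechanism_of_injury", "mechanism_of_injury"),
-- )
--
--
-- def extract_donor_metadata(metadata):
--     donor_metadata = metadata.get("mapped_metadata", {})
--     return {
--         tgt: donor_metadata[src].get("value_display") if src in donor_metadata else None
--         for tgt, src in _FIELD_MAP
--     }
-- ===== Notes on version B (the rewrite author's own statement) =====
-- stated objective: idiomatic
-- what changed: Replaces the mutated donor_info dict plus ten-way if/elif dispatch over the input's metadata keys with a fixed (field, source-key) table and a single dict comprehension that looks each source key up directly.
import Mathlib
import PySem

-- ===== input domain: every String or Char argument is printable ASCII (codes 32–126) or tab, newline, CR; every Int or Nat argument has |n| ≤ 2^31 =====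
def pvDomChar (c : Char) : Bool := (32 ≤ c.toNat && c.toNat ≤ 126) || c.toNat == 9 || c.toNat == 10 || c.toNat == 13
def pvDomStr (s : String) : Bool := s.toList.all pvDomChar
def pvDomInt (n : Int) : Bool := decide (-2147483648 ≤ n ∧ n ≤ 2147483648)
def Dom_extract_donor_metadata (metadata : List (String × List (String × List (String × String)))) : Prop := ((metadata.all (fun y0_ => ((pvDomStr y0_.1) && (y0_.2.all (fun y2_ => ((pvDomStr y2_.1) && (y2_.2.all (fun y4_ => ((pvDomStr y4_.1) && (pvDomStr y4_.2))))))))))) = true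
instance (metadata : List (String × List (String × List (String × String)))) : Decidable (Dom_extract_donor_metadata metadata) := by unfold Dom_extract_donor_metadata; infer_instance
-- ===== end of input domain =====

-- B replaces A's mutated dict + if/elif key dispatch by a fixed field table mapped once (idiomatic, same cost).

-- shared primitive composition: donor_metadata[key].get("value_display"), the inner
-- List (String × String) acting as a Python dict (duplicate raw keys collapse last-wins
-- exactly as dict construction does, via PySem.Dict.ofList)
def pvVal (dm : PySem.Dict String (List (String × String))) (key : String) : Option String :=
  (PySem.Dict.ofList (PySem.Dict.getD dm key [])).get? "value_display"

-- ===== PORT A =====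
-- the body of A's 'for key in donor_metadata' loop, step for step (same branch order)
def pvStepA (dm : PySem.Dict String (List (String × String)))
    (di : PySem.Dict String (Option String)) (key : String) : PySem.Dict String (Option String) :=
  if key == "abo_blood_group_system" then di.insert "abo_blood_type" (pvVal dm key)
  else if key == "age" then di.insert "age" (pvVal dm key)
  else if key == "body_mass_index" then di.insert "bmi" (pvVal dm key)
  else if key == "cause_of_death" then di.insert "cause_of_death" (pvVal dm key)
  else if key == "height" then di.insert "height" (pvVal dm key)
  else if key == "mechanism_of_injury" then di.insert "mechanism_of_injury" (pvVal dm key)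
  else if key == "race" then di.insert "race" (pvVal dm key)
  else if key == "sex" then di.insert "sex" (pvVal dm key)
  else if key == "social_history" then di.insert "social_history" (pvVal dm key)
  else if key == "weight" then di.insert "weight" (pvVal dm key)
  else di

def extract_donor_metadata (metadata : List (String × List (String × List (String × String)))) : List (String × Option String) :=
  let donor_info : PySem.Dict String (Option String) :=
    PySem.Dict.ofList [("age", none), ("sex", none), ("height", none), ("weight", none),
      ("bmi", none), ("cause_of_death", none), ("race", none), ("social_history", none),
      ("abo_blood_type", none), ("mechanism_of_injury", none)]
  let donor_metadata : PySem.Dict String (List (String × String)) :=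
    PySem.Dict.ofList ((PySem.Dict.ofList metadata).getD "mapped_metadata" [])
  (donor_metadata.keys.foldl (pvStepA donor_metadata) donor_info).items

-- ===== PORT B =====
def pvFieldMap : List (String × String) :=
  [("age", "age"), ("sex", "sex"), ("height", "height"), ("weight", "weight"),
   ("bmi", "body_mass_index"), ("cause_of_death", "cause_of_death"), ("race", "race"),
   ("social_history", "social_history"), ("abo_blood_type", "abo_blood_group_system"),
   ("mechanism_of_injury", "mechanism_of_injury")]

def extract_donor_metadata_alt (metadata : List (String × List (String × List (String × String)))) : List (String × Option String) :=
  let donor_metadata : PySem.Dict String (List (String × String)) :=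
    PySem.Dict.ofList ((PySem.Dict.ofList metadata).getD "mapped_metadata" [])
  pvFieldMap.map (fun p =>
    (p.1, if donor_metadata.contains p.2 then pvVal donor_metadata p.2 else none))

-- ===== PRECONDITION & SPEC =====
def Spec_extract_donor_metadata (metadata : List (String × List (String × List (String × String)))) (out : List (String × Option String)) : Prop := out = extract_donor_metadata_alt metadata
instance (metadata : List (String × List (String × List (String × String)))) (out : List (String × Option String)) : Decidable (Spec_extract_donor_metadata metadata out) := by unfold Spec_extract_donor_metadata; infer_instance

-- ===== CLAIM (what is proved, stated in full; the proofs are below) =====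
def Claim_equal_extract_donor_metadata : Prop := ∀ (metadata : List (String × List (String × List (String × String)))), Dom_extract_donor_metadata metadata → Spec_extract_donor_metadata metadata (extract_donor_metadata metadata)

-- ===== LEMMAS AND PROOFS =====

-- the value field (sourced from metadata key src) holds after A's loop has scanned
-- the keys ks, starting from v
def pvUpd (dm : PySem.Dict String (List (String × String))) (ks : List String)
    (src : String) (v : Option String) : Option String :=
  if src ∈ ks then pvVal dm src else v

theorem pvStepA_abo_blood_type (dm : PySem.Dict String (List (String × String))) (a s h w b c r so ab m : Option String) :
    pvStepA dm (PySem.Dict.mk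
      [("age", a), ("sex", s), ("height", h), ("weight", w), ("bmi", b), ("cause_of_death", c), ("race", r), ("social_history", so), ("abo_blood_type", ab), ("mechanism_of_injury", m)]) "abo_blood_group_system" = PySem.Dict.mk
      [("age", a), ("sex", s), ("height", h), ("weight", w), ("bmi", b), ("cause_of_death", c), ("race", r), ("social_history", so), ("abo_blood_type", pvVal dm "abo_blood_group_system"), ("mechanism_of_injury", m)] := by
  simp [pvStepA, PySem.Dict.insert, PySem.Dict.contains]

theorem pvStepA_age (dm : PySem.Dict String (List (String × String))) (a s h w b c r so ab m : Option String) :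
    pvStepA dm (PySem.Dict.mk
      [("age", a), ("sex", s), ("height", h), ("weight", w), ("bmi", b), ("cause_of_death", c), ("race", r), ("social_history", so), ("abo_blood_type", ab), ("mechanism_of_injury", m)]) "age" = PySem.Dict.mk
      [("age", pvVal dm "age"), ("sex", s), ("height", h), ("weight", w), ("bmi", b), ("cause_of_death", c), ("race", r), ("social_history", so), ("abo_blood_type", ab), ("mechanism_of_injury", m)] := by
  simp [pvStepA, PySem.Dict.insert, PySem.Dict.contains]

theorem pvStepA_bmi (dm : PySem.Dict String (List (String × String))) (a s h w b c r so ab m : Option String) :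
    pvStepA dm (PySem.Dict.mk
      [("age", a), ("sex", s), ("height", h), ("weight", w), ("bmi", b), ("cause_of_death", c), ("race", r), ("social_history", so), ("abo_blood_type", ab), ("mechanism_of_injury", m)]) "body_mass_index" = PySem.Dict.mk
      [("age", a), ("sex", s), ("height", h), ("weight", w), ("bmi", pvVal dm "body_mass_index"), ("cause_of_death", c), ("race", r), ("social_history", so), ("abo_blood_type", ab), ("mechanism_of_injury", m)] := by
  simp [pvStepA, PySem.Dict.insert, PySem.Dict.contains]

theorem pvStepA_cause_of_death (dm : PySem.Dict String (List (String × String))) (a s h w b c r so ab m : Option String) :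
    pvStepA dm (PySem.Dict.mk
      [("age", a), ("sex", s), ("height", h), ("weight", w), ("bmi", b), ("cause_of_death", c), ("race", r), ("social_history", so), ("abo_blood_type", ab), ("mechanism_of_injury", m)]) "cause_of_death" = PySem.Dict.mk
      [("age", a), ("sex", s), ("height", h), ("weight", w), ("bmi", b), ("cause_of_death", pvVal dm "cause_of_death"), ("race", r), ("social_history", so), ("abo_blood_type", ab), ("mechanism_of_injury", m)] := by
  simp [pvStepA, PySem.Dict.insert, PySem.Dict.contains]

theorem pvStepA_height (dm : PySem.Dict String (List (String × String))) (a s h w b c r so ab m : Option String) :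
    pvStepA dm (PySem.Dict.mk
      [("age", a), ("sex", s), ("height", h), ("weight", w), ("bmi", b), ("cause_of_death", c), ("race", r), ("social_history", so), ("abo_blood_type", ab), ("mechanism_of_injury", m)]) "height" = PySem.Dict.mk
      [("age", a), ("sex", s), ("height", pvVal dm "height"), ("weight", w), ("bmi", b), ("cause_of_death", c), ("race", r), ("social_history", so), ("abo_blood_type", ab), ("mechanism_of_injury", m)] := by
  simp [pvStepA, PySem.Dict.insert, PySem.Dict.contains]

theorem pvStepA_mechanism_of_injury (dm : PySem.Dict String (List (String × String))) (a s h w b c r so ab m : Option String) :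
    pvStepA dm (PySem.Dict.mk
      [("age", a), ("sex", s), ("height", h), ("weight", w), ("bmi", b), ("cause_of_death", c), ("race", r), ("social_history", so), ("abo_blood_type", ab), ("mechanism_of_injury", m)]) "mechanism_of_injury" = PySem.Dict.mk
      [("age", a), ("sex", s), ("height", h), ("weight", w), ("bmi", b), ("cause_of_death", c), ("race", r), ("social_history", so), ("abo_blood_type", ab), ("mechanism_of_injury", pvVal dm "mechanism_of_injury")] := by
  simp [pvStepA, PySem.Dict.insert, PySem.Dict.contains]

theorem pvStepA_race (dm : PySem.Dict String (List (String × String))) (a s h w b c r so ab m : Option String) :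
    pvStepA dm (PySem.Dict.mk
      [("age", a), ("sex", s), ("height", h), ("weight", w), ("bmi", b), ("cause_of_death", c), ("race", r), ("social_history", so), ("abo_blood_type", ab), ("mechanism_of_injury", m)]) "race" = PySem.Dict.mk
      [("age", a), ("sex", s), ("height", h), ("weight", w), ("bmi", b), ("cause_of_death", c), ("race", pvVal dm "race"), ("social_history", so), ("abo_blood_type", ab), ("mechanism_of_injury", m)] := by
  simp [pvStepA, PySem.Dict.insert, PySem.Dict.contains]

theorem pvStepA_sex (dm : PySem.Dict String (List (String × String))) (a s h w b c r so ab m : Option String) :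
    pvStepA dm (PySem.Dict.mk
      [("age", a), ("sex", s), ("height", h), ("weight", w), ("bmi", b), ("cause_of_death", c), ("race", r), ("social_history", so), ("abo_blood_type", ab), ("mechanism_of_injury", m)]) "sex" = PySem.Dict.mk
      [("age", a), ("sex", pvVal dm "sex"), ("height", h), ("weight", w), ("bmi", b), ("cause_of_death", c), ("race", r), ("social_history", so), ("abo_blood_type", ab), ("mechanism_of_injury", m)] := by
  simp [pvStepA, PySem.Dict.insert, PySem.Dict.contains]

theorem pvStepA_social_history (dm : PySem.Dict String (List (String × String))) (a s h w b c r so ab m : Option String) :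
    pvStepA dm (PySem.Dict.mk
      [("age", a), ("sex", s), ("height", h), ("weight", w), ("bmi", b), ("cause_of_death", c), ("race", r), ("social_history", so), ("abo_blood_type", ab), ("mechanism_of_injury", m)]) "social_history" = PySem.Dict.mk
      [("age", a), ("sex", s), ("height", h), ("weight", w), ("bmi", b), ("cause_of_death", c), ("race", r), ("social_history", pvVal dm "social_history"), ("abo_blood_type", ab), ("mechanism_of_injury", m)] := by
  simp [pvStepA, PySem.Dict.insert, PySem.Dict.contains]

theorem pvStepA_weight (dm : PySem.Dict String (List (String × String))) (a s h w b c r so ab m : Option String) :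
    pvStepA dm (PySem.Dict.mk
      [("age", a), ("sex", s), ("height", h), ("weight", w), ("bmi", b), ("cause_of_death", c), ("race", r), ("social_history", so), ("abo_blood_type", ab), ("mechanism_of_injury", m)]) "weight" = PySem.Dict.mk
      [("age", a), ("sex", s), ("height", h), ("weight", pvVal dm "weight"), ("bmi", b), ("cause_of_death", c), ("race", r), ("social_history", so), ("abo_blood_type", ab), ("mechanism_of_injury", m)] := by
  simp [pvStepA, PySem.Dict.insert, PySem.Dict.contains]

theorem pvStepA_other (dm : PySem.Dict String (List (String × String))) (k : String)
    (a s h w b c r so ab m : Option String) (h0 : k ≠ "abo_blood_group_system") (h1 : k ≠ "age") (h2 : k ≠ "body_mass_index") (h3 : k ≠ "cause_of_death") (h4 : k ≠ "height") (h5 : k ≠ "mechanism_of_injury") (h6 : k ≠ "race") (h7 : k ≠ "sex") (h8 : k ≠ "social_history") (h9 : k ≠ "weight") :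
    pvStepA dm (PySem.Dict.mk
      [("age", a), ("sex", s), ("height", h), ("weight", w), ("bmi", b), ("cause_of_death", c), ("race", r), ("social_history", so), ("abo_blood_type", ab), ("mechanism_of_injury", m)]) k = PySem.Dict.mk
      [("age", a), ("sex", s), ("height", h), ("weight", w), ("bmi", b), ("cause_of_death", c), ("race", r), ("social_history", so), ("abo_blood_type", ab), ("mechanism_of_injury", m)] := by
  simp [pvStepA, h0, h1, h2, h3, h4, h5, h6, h7, h8, h9]

theorem pvLoopA (dm : PySem.Dict String (List (String × String))) (ks : List String)
    (a s h w b c r so ab m : Option String) :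
    ks.foldl (pvStepA dm) (PySem.Dict.mk
      [("age", a), ("sex", s), ("height", h), ("weight", w), ("bmi", b), ("cause_of_death", c), ("race", r), ("social_history", so), ("abo_blood_type", ab), ("mechanism_of_injury", m)]) = PySem.Dict.mk
      [("age", pvUpd dm ks "age" a), ("sex", pvUpd dm ks "sex" s), ("height", pvUpd dm ks "height" h), ("weight", pvUpd dm ks "weight" w), ("bmi", pvUpd dm ks "body_mass_index" b), ("cause_of_death", pvUpd dm ks "cause_of_death" c), ("race", pvUpd dm ks "race" r), ("social_history", pvUpd dm ks "social_history" so), ("abo_blood_type", pvUpd dm ks "abo_blood_group_system" ab), ("mechanism_of_injury", pvUpd dm ks "mechanism_of_injury" m)] := by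
  induction ks generalizing a s h w b c r so ab m with
  | nil => simp [pvUpd]
  | cons k ks ih =>
    by_cases h0 : k = "abo_blood_group_system"
    · subst h0
      rw [List.foldl_cons, pvStepA_abo_blood_type, ih]
      simp [pvUpd, List.mem_cons]
    by_cases h1 : k = "age"
    · subst h1
      rw [List.foldl_cons, pvStepA_age, ih]
      simp [pvUpd, List.mem_cons]
    by_cases h2 : k = "body_mass_index"
    · subst h2
      rw [List.foldl_cons, pvStepA_bmi, ih]
      simp [pvUpd, List.mem_cons]
    by_cases h3 : k = "cause_of_death"
    · subst h3
      rw [List.foldl_cons, pvStepA_cause_of_death, ih]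
      simp [pvUpd, List.mem_cons]
    by_cases h4 : k = "height"
    · subst h4
      rw [List.foldl_cons, pvStepA_height, ih]
      simp [pvUpd, List.mem_cons]
    by_cases h5 : k = "mechanism_of_injury"
    · subst h5
      rw [List.foldl_cons, pvStepA_mechanism_of_injury, ih]
      simp [pvUpd, List.mem_cons]
    by_cases h6 : k = "race"
    · subst h6
      rw [List.foldl_cons, pvStepA_race, ih]
      simp [pvUpd, List.mem_cons]
    by_cases h7 : k = "sex"
    · subst h7
      rw [List.foldl_cons, pvStepA_sex, ih]
      simp [pvUpd, List.mem_cons]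
    by_cases h8 : k = "social_history"
    · subst h8
      rw [List.foldl_cons, pvStepA_social_history, ih]
      simp [pvUpd, List.mem_cons]
    by_cases h9 : k = "weight"
    · subst h9
      rw [List.foldl_cons, pvStepA_weight, ih]
      simp [pvUpd, List.mem_cons]
    rw [List.foldl_cons, pvStepA_other dm k a s h w b c r so ab m h0 h1 h2 h3 h4 h5 h6 h7 h8 h9, ih]
    simp [pvUpd, List.mem_cons, Ne.symm h0, Ne.symm h1, Ne.symm h2, Ne.symm h3, Ne.symm h4, Ne.symm h5, Ne.symm h6, Ne.symm h7, Ne.symm h8, Ne.symm h9]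

-- ===== VERDICT (by name: the statement is the Claim_ definition above) =====
theorem extract_donor_metadata_spec : Claim_equal_extract_donor_metadata := by
  intro metadata _
  show extract_donor_metadata metadata = extract_donor_metadata_alt metadata
  simp only [extract_donor_metadata, extract_donor_metadata_alt]
  rw [show (PySem.Dict.ofList [("age", (none : Option String)), ("sex", none), ("height", none),
        ("weight", none), ("bmi", none), ("cause_of_death", none), ("race", none),
        ("social_history", none), ("abo_blood_type", none), ("mechanism_of_injury", none)])
      = PySem.Dict.mk [("age", (none : Option String)), ("sex", none), ("height", none),
        ("weight", none), ("bmi", none), ("cause_of_death", none), ("race", none),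
        ("social_history", none), ("abo_blood_type", none), ("mechanism_of_injury", none)] from rfl]
  rw [pvLoopA]
  simp [pvFieldMap, pvUpd, PySem.Dict.contains_eq_decide_mem_keys]
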